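-- pv_equiv track=rewrite | github.com/Alex-cisneros/googlon-challenge | functions.py | number_converter
-- ===== SOURCE A (Python) =====
-- def number_converter(word):
--     googlon_to_numbers ={"s": 0,"x": 1,"o": 2,"c": 3,"q": 4,"n": 5,"m": 6,"w": 7,"p": 8,"f": 9,"y": 10,"h": 11,"e": 12,"l": 13,"j": 14,"r": 15,"d": 16,"g": 17,"u": 18,"i": 19}
--     number = 0
--     base = 1
--     for character in word:
--         number += googlon_to_numbers[character] * base
--         base *= 20
--
--     return number
-- ===== SOURCE B (Python) =====
-- def number_converter(word):
--     # Map googlon digits (value 0..19) onto the standard base-20 digit characters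
--     # 0-9,a-j, then let int(.., 20) do all the arithmetic; the word is reversed
--     # because the first googlon character is the least significant digit.
--     table = str.maketrans("sxocqnmwpfyheljrdgui", "0123456789abcdefghij")
--     if not word:
--         return 0
--     return int(word[::-1].translate(table), 20)
-- ===== Notes on version B (the rewrite author's own statement) =====
-- stated objective: alternative
-- what changed: B does no digit arithmetic itself: it translates googlon letters to the standard base-20 digit characters 0-9a-j, reverses the string, and delegates the whole conversion to Python's built-in int(s, 20) parser, replacing A's interpreted loop that maintains a running bigint base power.
-- outside the precondition, e.g. on number_converter('za'): A raises KeyError, B raises ValueError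
import Mathlib
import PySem

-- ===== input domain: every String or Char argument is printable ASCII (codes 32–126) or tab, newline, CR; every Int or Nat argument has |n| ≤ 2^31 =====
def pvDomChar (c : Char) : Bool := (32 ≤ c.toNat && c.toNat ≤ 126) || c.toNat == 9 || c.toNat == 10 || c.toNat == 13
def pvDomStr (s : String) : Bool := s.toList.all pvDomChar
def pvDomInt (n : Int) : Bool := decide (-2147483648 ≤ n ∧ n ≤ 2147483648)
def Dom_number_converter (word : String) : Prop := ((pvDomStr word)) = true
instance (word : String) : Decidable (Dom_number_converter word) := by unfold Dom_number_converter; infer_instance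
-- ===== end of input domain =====

-- B does no digit arithmetic: it translates googlon letters to base-20 digit characters
-- 0-9a-j, reverses, and hands the string to the built-in base-20 parser ("alternative").

-- ===== PORT A =====
-- A's digit table (dict lookup; a missing key raises KeyError, excluded by Pre_ below)
def gval (c : Char) : Int :=
  match c with
  | 's' => 0 | 'x' => 1 | 'o' => 2 | 'c' => 3 | 'q' => 4
  | 'n' => 5 | 'm' => 6 | 'w' => 7 | 'p' => 8 | 'f' => 9
  | 'y' => 10 | 'h' => 11 | 'e' => 12 | 'l' => 13 | 'j' => 14
  | 'r' => 15 | 'd' => 16 | 'g' => 17 | 'u' => 18 | 'i' => 19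
  | _ => 0

-- A's loop: number += digit * base; base *= 20
def numLoopA : List Char → Int → Int → Int
  | [], number, _ => number
  | c :: t, number, base => numLoopA t (number + gval c * base) (base * 20)

def number_converter (word : String) : Int := numLoopA word.toList 0 1

-- ===== PORT B =====
-- Source B's str.maketrans/translate table: googlon letter → base-20 digit character
def trB (c : Char) : Char :=
  match c with
  | 's' => '0' | 'x' => '1' | 'o' => '2' | 'c' => '3' | 'q' => '4'
  | 'n' => '5' | 'm' => '6' | 'w' => '7' | 'p' => '8' | 'f' => '9'
  | 'y' => 'a' | 'h' => 'b' | 'e' => 'c' | 'l' => 'd' | 'j' => 'e'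
  | 'r' => 'f' | 'd' => 'g' | 'g' => 'h' | 'u' => 'i' | 'i' => 'j'
  | d => d        -- str.translate leaves unmapped characters unchanged

-- value of a base-20 digit character, as int(s, 20) reads it
def digVal20 (c : Char) : Int :=
  if '0' ≤ c ∧ c ≤ '9' then (c.toNat : Int) - 48
  else if 'a' ≤ c ∧ c ≤ 'j' then (c.toNat : Int) - 87
  else if 'A' ≤ c ∧ c ≤ 'J' then (c.toNat : Int) - 55
  else 0          -- int(s, 20) raises ValueError here; such inputs lie outside Pre_

def isPyWS (c : Char) : Bool := c ∈ [' ', '\t', '\n', '\r', '\x0b', '\x0c']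

-- hand port of int(s, 20) (exact on the printable-ASCII strings it accepts):
-- strip whitespace, optional sign, underscores skipped, most-significant-first fold
def parse20 : List Char → Int → Int
  | [], acc => acc
  | c :: t, acc => if c = '_' then parse20 t acc else parse20 t (acc * 20 + digVal20 c)

def int20 (l : List Char) : Int :=
  let t := ((l.dropWhile isPyWS).reverse.dropWhile isPyWS).reverse
  match t with
  | '-' :: r => -(parse20 r 0)
  | '+' :: r => parse20 r 0
  | r => parse20 r 0

def number_converter_alt (word : String) : Int :=
  if word.toList = [] then 0
  else int20 ((word.toList.reverse).map trB)

-- ===== PRECONDITION & SPEC =====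
-- Pre_ excludes words containing a character outside the googlon digit table,
-- on which A raises KeyError (and B raises ValueError).
def googlonKeys : List Char :=
  ['s','x','o','c','q','n','m','w','p','f','y','h','e','l','j','r','d','g','u','i']

def Pre_number_converter (word : String) : Prop :=
  (word.toList.all (fun c => googlonKeys.contains c)) = true
instance (word : String) : Decidable (Pre_number_converter word) := by
  unfold Pre_number_converter; infer_instance

def pvWitness_number_converter : String := "foyl"

def Spec_number_converter (word : String) (out : Int) : Prop := out = number_converter_alt word
instance (word : String) (out : Int) : Decidable (Spec_number_converter word out) := by unfold Spec_number_converter; infer_instance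

-- ===== CLAIM (what is proved, stated in full; the proofs are below) =====
def Claim_equal_number_converter : Prop := ∀ (word : String), Dom_number_converter word → Pre_number_converter word → Spec_number_converter word (number_converter word)

-- ===== LEMMAS AND PROOFS =====

theorem digVal20_trB (c : Char) (h : googlonKeys.contains c = true) :
    digVal20 (trB c) = gval c := by
  simp only [googlonKeys, List.contains_eq_mem, List.mem_cons, List.not_mem_nil,
    or_false, decide_eq_true_eq] at h
  rcases h with h|h|h|h|h|h|h|h|h|h|h|h|h|h|h|h|h|h|h|h <;> subst h <;> decide

theorem numLoopA_shift (l : List Char) : ∀ (n b : Int),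
    numLoopA l n b = n + b * numLoopA l 0 1 := by
  induction l with
  | nil => intro n b; simp [numLoopA]
  | cons c t ih =>
    intro n b
    simp only [numLoopA]
    rw [ih (n + gval c * b) (b * 20), ih (0 + gval c * 1) (1 * 20)]
    ring

-- a googlon key is translated to a plain base-20 digit character 0-9a-j
def okDig (c : Char) : Bool := decide (('0' ≤ c ∧ c ≤ '9') ∨ ('a' ≤ c ∧ c ≤ 'j'))

theorem okDig_trB (c : Char) (h : googlonKeys.contains c = true) :
    okDig (trB c) = true := by
  simp only [googlonKeys, List.contains_eq_mem, List.mem_cons, List.not_mem_nil,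
    or_false, decide_eq_true_eq] at h
  rcases h with h|h|h|h|h|h|h|h|h|h|h|h|h|h|h|h|h|h|h|h <;> subst h <;> decide

theorem okDig_facts (c : Char) (h : okDig c = true) :
    isPyWS c = false ∧ c ≠ '-' ∧ c ≠ '+' ∧ c ≠ '_' := by
  simp only [okDig, decide_eq_true_eq] at h
  refine ⟨?_, ?_, ?_, ?_⟩ <;>
    · rcases h with ⟨h1, h2⟩ | ⟨h1, h2⟩ <;>
      · simp only [isPyWS, Char.le_def] at *
        first
        | (simp only [List.mem_cons, List.not_mem_nil, or_false, decide_eq_false_iff_not,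
            not_or]
           refine ⟨?_, ?_, ?_, ?_, ?_, ?_⟩ <;> rintro rfl <;> revert h1 h2 <;> decide)
        | (rintro rfl; revert h1 h2; decide)

theorem dropWhile_ok (l : List Char) (h : ∀ c ∈ l, okDig c = true) :
    l.dropWhile isPyWS = l := by
  cases l with
  | nil => rfl
  | cons c t =>
    have := (okDig_facts c (h c (List.mem_cons_self ..))).1
    simp [List.dropWhile, this]

-- on all-digit strings int20 is just the plain fold
theorem int20_ok (l : List Char) (h : ∀ c ∈ l, okDig c = true) :
    int20 l = parse20 l 0 := by
  have hrev : ∀ c ∈ l.reverse, okDig c = true := fun c hc => h c (List.mem_reverse.mp hc)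
  unfold int20
  rw [dropWhile_ok l h, dropWhile_ok l.reverse hrev, List.reverse_reverse]
  cases l with
  | nil => rfl
  | cons c t =>
    obtain ⟨-, h1, h2, -⟩ := okDig_facts c (h c (List.mem_cons_self ..))
    cases hc : c; simp_all

theorem parse20_snoc (l : List Char) (c : Char) (hc : okDig c = true) : ∀ (n : Int),
    parse20 (l ++ [c]) n = parse20 l n * 20 + digVal20 c := by
  have h4 := (okDig_facts c hc).2.2.2
  induction l with
  | nil => intro n; simp [parse20, h4]
  | cons d t ih =>
    intro n
    simp only [List.cons_append, parse20]
    split <;> exact ih _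

theorem loops_agree (l : List Char) (h : ∀ c ∈ l, googlonKeys.contains c = true) :
    parse20 (l.reverse.map trB) 0 = numLoopA l 0 1 := by
  induction l with
  | nil => rfl
  | cons c t ih =>
    have hc := h c (List.mem_cons_self ..)
    have ht : ∀ d ∈ t, googlonKeys.contains d = true :=
      fun d hd => h d (List.mem_cons_of_mem _ hd)
    simp only [List.reverse_cons, List.map_append, List.map_cons, List.map_nil,
      parse20_snoc _ _ (okDig_trB c hc), ih ht, numLoopA, digVal20_trB c hc]
    rw [numLoopA_shift t (0 + gval c * 1) (1 * 20)]
    ring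

-- ===== VERDICT (by name: the statement is the Claim_ definition above) =====
theorem number_converter_spec : Claim_equal_number_converter := by
  intro word _ hpre
  unfold Spec_number_converter number_converter number_converter_alt
  unfold Pre_number_converter at hpre
  rw [List.all_eq_true] at hpre
  have heq := loops_agree word.toList hpre
  split
  · next h => rw [← heq, h]; rfl
  · next h =>
      rw [int20_ok]
      · exact heq.symm
      · intro c hc
        simp only [List.mem_map, List.mem_reverse] at hc
        obtain ⟨d, hd, rfl⟩ := hc
        exact okDig_trB d (hpre d hd)
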